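-- pv_equiv track=rewrite | github.com/Shamabanu/python | lexographically minimal permutation.py | found
-- ===== SOURCE A (Python) =====
-- def found(t,k):
--   avail=sorted(k.keys())
--   for i in range(len(avail)):
--     if t in avail:
--       t+=1
--     else:
--       break
--   return t
-- ===== SOURCE B (Python) =====
-- def found(t, k):
--     s = sorted(x for x in k if x >= t)
--     for i, x in enumerate(s):
--         if x != t + i:
--             return t + i
--     return t + len(s)
-- ===== Notes on version B (the rewrite author's own statement) =====
-- stated objective: alternative
-- what changed: Instead of repeatedly scanning the whole sorted key list for the current candidate t, B filters the keys to those >= t, sorts them once, and finds the first gap by comparing each sorted key with its expected arithmetic position t + index.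
import Mathlib
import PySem

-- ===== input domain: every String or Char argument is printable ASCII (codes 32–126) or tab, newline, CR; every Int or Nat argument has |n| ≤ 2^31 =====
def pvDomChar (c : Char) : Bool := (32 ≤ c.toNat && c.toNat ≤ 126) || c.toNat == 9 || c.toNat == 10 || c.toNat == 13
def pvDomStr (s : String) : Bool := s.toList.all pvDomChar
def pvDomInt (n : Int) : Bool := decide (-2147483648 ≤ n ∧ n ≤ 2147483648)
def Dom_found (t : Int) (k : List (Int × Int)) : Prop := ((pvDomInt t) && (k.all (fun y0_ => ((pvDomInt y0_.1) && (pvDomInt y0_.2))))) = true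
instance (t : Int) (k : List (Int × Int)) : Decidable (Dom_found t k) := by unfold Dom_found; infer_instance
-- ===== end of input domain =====

-- B discards keys below t, sorts the remainder once, and locates the first gap by
-- comparing each sorted key with its expected arithmetic position t + i (objective: alternative).

-- ===== PORT A =====
-- 'for i in range(len(avail)): if t in avail: t += 1 else: break' — fuel-counted loop with break
def foundLoopA (avail : List Int) : Nat → Int → Int
  | 0, t => t
  | n + 1, t => if t ∈ avail then foundLoopA avail n (t + 1) else t

def found (t : Int) (k : List (Int × Int)) : Int :=
  let avail := PySem.List.sorted (PySem.Dict.ofList k).keys (fun x => x) false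
  foundLoopA avail avail.length t

-- ===== PORT B =====
-- 'for i, x in enumerate(s): if x != t + i: return t + i' then 'return t + len(s)'
def gapLoop (t : Int) (s : List Int) : List (Int × Int) → Int
  | [] => t + (s.length : Int)
  | (i, x) :: rest => if x ≠ t + i then t + i else gapLoop t s rest

def found_alt (t : Int) (k : List (Int × Int)) : Int :=
  let s := PySem.List.sorted (((PySem.Dict.ofList k).keys).filter (fun x => decide (t ≤ x))) (fun x => x) false
  gapLoop t s (PySem.List.enumerate s)

-- ===== PRECONDITION & SPEC =====
def Spec_found (t : Int) (k : List (Int × Int)) (out : Int) : Prop := out = found_alt t k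
instance (t : Int) (k : List (Int × Int)) (out : Int) : Decidable (Spec_found t k out) := by unfold Spec_found; infer_instance

-- ===== CLAIM (what is proved, stated in full; the proofs are below) =====
def Claim_equal_found : Prop := ∀ (t : Int) (k : List (Int × Int)), Dom_found t k → Spec_found t k (found t k)

-- ===== LEMMAS AND PROOFS =====

-- A's loop only tests membership at values ≥ the current t
theorem foundLoopA_congr (n : Nat) : ∀ (L L' : List Int) (t : Int),
    (∀ s : Int, t ≤ s → (s ∈ L ↔ s ∈ L')) → foundLoopA L n t = foundLoopA L' n t := by
  induction n with
  | zero => intro L L' t _; rfl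
  | succ m ih =>
    intro L L' t h
    have ht : t ∈ L ↔ t ∈ L' := h t le_rfl
    simp only [foundLoopA]
    by_cases hm : t ∈ L
    · rw [if_pos hm, if_pos (ht.mp hm)]
      exact ih L L' (t + 1) (fun s hs => h s (by omega))
    · rw [if_neg hm, if_neg (fun c => hm (ht.mpr c))]

theorem foundLoopA_nil (n : Nat) (t : Int) : foundLoopA [] n t = t := by
  cases n <;> simp [foundLoopA]

theorem enumerate_succ (xs : List Int) : ∀ st : Int,
    PySem.List.enumerate xs (st + 1) = (PySem.List.enumerate xs st).map (fun p => (p.1 + 1, p.2)) := by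
  induction xs with
  | nil => intro st; simp [PySem.List.enumerate_nil]
  | cons x rest ih =>
    intro st
    rw [PySem.List.enumerate_cons, PySem.List.enumerate_cons, List.map_cons, ih (st + 1)]

-- shifting the enumerate index by one = shifting the target by one
theorem gapLoop_shift (t : Int) (x : Int) (rest : List Int) :
    ∀ pairs : List (Int × Int),
      gapLoop t (x :: rest) (pairs.map (fun p => (p.1 + 1, p.2))) = gapLoop (t + 1) rest pairs := by
  intro pairs
  induction pairs with
  | nil => simp [gapLoop]; ring
  | cons p ps ih =>
    obtain ⟨i, y⟩ := p
    simp only [List.map_cons, gapLoop]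
    by_cases hy : y = t + 1 + i
    · simp only [hy]
      rw [if_neg (by intro h; exact h (by ring)),
          if_neg (by intro h; exact h rfl)]
      exact ih
    · rw [if_pos (by intro h; exact hy (by omega)), if_pos (by intro h; exact hy (by omega))]
      ring

-- core: for a strictly increasing list s of exactly the admissible values ≥ t,
-- A's fuel loop over any list with the same ≥-t membership equals B's gap scan over s
theorem main_lemma : ∀ (s : List Int) (t : Int), s.Pairwise (· < ·) → (∀ x ∈ s, t ≤ x) →
    ∀ n, s.length ≤ n → foundLoopA s n t = gapLoop t s (PySem.List.enumerate s) := by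
  intro s
  induction s with
  | nil => intro t _ _ n _; rw [foundLoopA_nil]; simp [PySem.List.enumerate_nil, gapLoop]
  | cons x rest ih =>
    intro t hp hge n hn
    have hrest : rest.Pairwise (· < ·) := hp.of_cons
    have hx : ∀ y ∈ rest, x < y := fun y hy => List.rel_of_pairwise_cons hp hy
    have hxt : t ≤ x := hge x (List.mem_cons_self ..)
    rw [PySem.List.enumerate_cons]
    by_cases hcase : x = t
    · subst hcase
      obtain ⟨m, rfl⟩ : ∃ m, n = m + 1 := by
        cases n with
        | zero => simp at hn
        | succ m => exact ⟨m, rfl⟩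
      have step : foundLoopA (x :: rest) (m + 1) x = foundLoopA (x :: rest) m (x + 1) := by
        simp [foundLoopA]
      rw [step, foundLoopA_congr m (x :: rest) rest (x + 1)
            (by intro s hs; simp; intro hsx; omega)]
      have hB : gapLoop x (x :: rest) ((0, x) :: PySem.List.enumerate rest (0 + 1))
          = gapLoop (x + 1) rest (PySem.List.enumerate rest) := by
        simp only [gapLoop]
        rw [if_neg (by intro h; exact h (by ring))]
        rw [show (0:Int) + 1 = 0 + 1 from rfl, enumerate_succ rest 0, gapLoop_shift]
      rw [hB, ih (x + 1) hrest (fun y hy => by have := hx y hy; omega) m (by simpa using hn)]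
    · have hlt : t < x := lt_of_le_of_ne hxt (fun h => hcase h.symm)
      have hnm : t ∉ x :: rest := by
        intro hc
        rcases List.mem_cons.mp hc with h1 | h1
        · omega
        · exact absurd (hx t h1) (by omega)
      have hA : foundLoopA (x :: rest) n t = t := by
        cases n with
        | zero => rfl
        | succ m => simp only [foundLoopA]; rw [if_neg hnm]
      rw [hA]
      simp only [gapLoop]
      rw [if_pos (by intro h; exact hcase (by omega))]
      ring

-- the sorted filtered key list is strictly increasing
theorem sorted_filter_pairwise_lt (t : Int) (k : List (Int × Int)) :
    (PySem.List.sorted (((PySem.Dict.ofList k).keys).filter (fun x => decide (t ≤ x))) (fun x => x) false).Pairwise (· < ·) := by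
  have hle := PySem.List.sorted_pairwise (((PySem.Dict.ofList k).keys).filter (fun x => decide (t ≤ x))) (fun x : Int => x)
  have hnd : (PySem.List.sorted (((PySem.Dict.ofList k).keys).filter (fun x => decide (t ≤ x))) (fun x => x) false).Nodup :=
    (PySem.List.sorted_perm _ _ _).nodup_iff.mpr ((PySem.Dict.nodup_keys_ofList k).filter _)
  exact (hle.and hnd).imp (fun h => lt_of_le_of_ne h.1 h.2)

-- ===== VERDICT (by name: the statement is the Claim_ definition above) =====
theorem found_spec : Claim_equal_found := by
  intro t k _
  unfold Spec_found found found_alt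
  set K := (PySem.Dict.ofList k).keys with hK
  set avail := PySem.List.sorted K (fun x => x) false with ha
  set s := PySem.List.sorted (K.filter (fun x => decide (t ≤ x))) (fun x => x) false with hs
  have hmem : ∀ r : Int, t ≤ r → (r ∈ avail ↔ r ∈ s) := by
    intro r hr
    rw [ha, hs, PySem.List.mem_sorted, PySem.List.mem_sorted, List.mem_filter]
    simp [hr]
  have hlen : s.length ≤ avail.length := by
    rw [ha, hs, (PySem.List.sorted_perm _ _ _).length_eq, (PySem.List.sorted_perm _ _ _).length_eq]
    exact List.length_filter_le _ _
  have hge : ∀ x ∈ s, t ≤ x := by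
    intro x hx
    rw [hs, PySem.List.mem_sorted, List.mem_filter] at hx
    simpa using hx.2
  rw [foundLoopA_congr avail.length avail s t hmem,
      main_lemma s t (sorted_filter_pairwise_lt t k) hge avail.length hlen]
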